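/-
  THE SEGMENTS OF `GifFreeSavedImages` (gifalloc.c:431-453; 107EE0H … 107FA6H, 53 instructions; NO protected frame), as DGifCloseFile
  calls it (`gif.SavedImages ≠ NULL`): the assertions at its loop head and at the loop's exit, the three segment claims, and the
  COMPOSITION (segments ⇒ `GifFreeSavedImages.spec`), proved here by induction on the number of slots left.

  THE CODE:
      107EE0H  `GifFile == NULL` → 107FA5H (`ret`; dead: `rdi = F.gif`, a live object)
      107EE9H  three pushes (r12 rbp rbx)                                              rsp = RA − 24
      107EEDH  `rbp = gif`, `rbx = sp = gif.SavedImages` (checked); NULL → 107FA0H (dead: `F.saved ≠ none`)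
      107F07H  the latch: `GifFreeExtensions(&sp->ExtensionBlockCount, &sp->ExtensionBlocks)`, `sp++`
      107F18H  HEAD   `r12 = gif.SavedImages`, `rax = r12 + 56 · gif.ImageCount` (both checked); `sp >= rax` → 107F87H
      107F46H  `sp->ImageDesc.ColorMap` (checked) not NULL: `GifFreeMapObject(it)`, the checked store of NULL
      107F6EH  `sp->RasterBits` (checked) not NULL: `free(it)` (the field DANGLES: nobody reads it again) → 107F07H
      107F87H  EXIT   `free(r12)`, the checked store `gif.SavedImages = NULL`
      107FA0H  three pops, `ret`

  SEGMENTS: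
      GifFreeSavedImages.1   107EE0H … 107F07H    12 instructions   —                                            → `Head 0`
      GifFreeSavedImages.2   107F07H … 107F87H    31 instructions   GifFreeMapObject, free, GifFreeExtensions    `Head k` → `Head (k + 1)` | `AtExit`
                             (entered at the head 107F18H)
      GifFreeSavedImages.3   107F87H … 107FA5H     9 instructions   free                                         `AtExit` → `Returned`

  THE LOOP INVARIANT (`Head k`): the heap is `heapAt H s k` (the entry's with every object of the first `k` images freed); what is
  still live is `liveAt F s k` (the array, the objects of the images from `k` on, everything else the forest owns); the SHAPE
  holds for `forestAt F s k`: `F` with the first `k` images replaced by `doneImg` (no colour map, no extension list, THE RASTER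
  KEPT: its field dangles, and `Shape` says what the fields hold, not that the objects are live). `Shape` and `Owns` separately:
  the state invariant `GifOK` is false inside the loop. Where the forest's objects are (`Placed`, for `Shape.set_saved`) is said of
  ALL objects of `F`, live or freed: `placedAt`.

  THE ORDER OF THE `free`s: `GifFreeMapObject` frees `Colors` before the object, `Img.objs` lists the object first; the array
  comes first in `Saved.objs` and is freed last. `free`s commute: `GifFreeExtensions.release_comm`, `heapAt_round`, `heapAt_end`.

  THE CURSOR IN SEGMENT 2: the gap windows of `GifFreeExtensions.spec`'s post lie at or above the heap's base or in the stack below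
  ITS entry stack pointer: they miss the cursor (a stack object of gif_decode): `rem` and `Shape.cursor` go through.
-/
import Gif.Spec.Alloc
import Gif.Spec.ForestCarry
import Gif.Spec.Seg_GifFreeExtensions
import Gif.LabelsAt
namespace Gif.Spec
open X86 X86.User Asan ProgX.Base ProgX.Base.Spec

namespace GifFreeSavedImages

/-! ### The forest, the heap and the live objects after `k` rounds -/

/-- **A slot the loop is done with**: the colour map is freed and its field nulled, the extension list is freed and its pair
nulled; the raster is freed too, but its FIELD still holds the address (l.445 stores nothing). -/
def doneImg (g : Img) : Img := ⟨none, g.raster, none⟩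

/-- The images after `k` rounds: the first `k` are done, the others are as they were. -/
def imgsAt (s : Saved) (k : Nat) : List Img := (s.imgs.take k).map doneImg ++ s.imgs.drop k

/-- **The forest whose SHAPE the memory has after `k` rounds.** -/
def forestAt (F : Forest) (s : Saved) (k : Nat) : Forest := { F with saved := some { s with imgs := imgsAt s k } }

/-- **The heap after `k` rounds**: every object of the first `k` images is freed. -/
def heapAt (H : Heap) (s : Saved) (k : Nat) : Heap :=
  H.releaseAll (((s.imgs.take k).flatMap Img.objs).map Prod.fst)

/-- **What is still live after `k` rounds**: the array, the objects of the images from `k` on, everything else of the forest. -/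
def liveAt (F : Forest) (s : Saved) (k : Nat) : List (Nat × Nat) :=
  (s.arr, 56 * s.cap) :: ((s.imgs.drop k).flatMap Img.objs ++ F.ownedButSaved)

/-! The components of `forestAt F s k`: `F`'s but for `saved` (for `closeShape_of_carry`, and to read `Shape (forestAt F s k)`). -/

theorem forestAt_gif (F : Forest) (s : Saved) (k : Nat) : (forestAt F s k).gif = F.gif := rfl
theorem forestAt_pv (F : Forest) (s : Saved) (k : Nat) : (forestAt F s k).pv = F.pv := rfl
theorem forestAt_scm (F : Forest) (s : Saved) (k : Nat) : (forestAt F s k).scm = F.scm := rfl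
theorem forestAt_icm (F : Forest) (s : Saved) (k : Nat) : (forestAt F s k).icm = F.icm := rfl
theorem forestAt_pend (F : Forest) (s : Saved) (k : Nat) : (forestAt F s k).pend = F.pend := rfl
theorem forestAt_saved (F : Forest) (s : Saved) (k : Nat) :
    (forestAt F s k).saved = some { s with imgs := imgsAt s k } := rfl

/-- The number of slots does not change. -/
theorem imgsAt_length (s : Saved) (k : Nat) : (imgsAt s k).length = s.imgs.length := by
  unfold imgsAt
  rw [List.length_append, List.length_map, List.length_take, List.length_drop]
  omega

/-- A slot before `k` is done. -/
theorem imgsAt_lt (s : Saved) (k j : Nat) (hj : j < s.imgs.length) (hjk : j < k) (h' : j < (imgsAt s k).length) :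
    (imgsAt s k)[j] = doneImg s.imgs[j] := by
  unfold imgsAt
  have hl : j < ((s.imgs.take k).map doneImg).length := by
    rw [List.length_map, List.length_take]
    omega
  rw [List.getElem_append_left hl, List.getElem_map, List.getElem_take]

/-- A slot from `k` on is as it was. -/
theorem imgsAt_ge (s : Saved) (k j : Nat) (hj : j < s.imgs.length) (hkj : k ≤ j) (h' : j < (imgsAt s k).length) :
    (imgsAt s k)[j] = s.imgs[j] := by
  unfold imgsAt
  have hl : ((s.imgs.take k).map doneImg).length = k := by
    rw [List.length_map, List.length_take]
    omega
  have hr : ((s.imgs.take k).map doneImg).length ≤ j := by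
    omega
  rw [List.getElem_append_right hr, List.getElem_drop]
  congr 1
  omega

/-- Before the first round: the entry's forest. -/
theorem forestAt_zero (F : Forest) (s : Saved) (hs : F.saved = some s) : forestAt F s 0 = F := by
  obtain ⟨gif, pv, scm, icm, saved, pend⟩ := F
  obtain ⟨arr, cap, imgs⟩ := s
  simp only at hs
  subst hs
  rfl

/-- Before the first round: the entry's heap. -/
theorem heapAt_zero (H : Heap) (s : Saved) : heapAt H s 0 = H := rfl

/-- Before the first round everything the forest owns is live (`Owns.perm` from `GifOK.owns`). -/
theorem liveAt_zero (F : Forest) (s : Saved) (hs : F.saved = some s) : F.owned.Perm (liveAt F s 0) := by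
  have h := F.owned_saved
  rw [hs] at h
  exact h

/-- **One round**: the objects of image `k` are freed. -/
theorem heapAt_succ (H : Heap) (s : Saved) (k : Nat) (hk : k < s.imgs.length) :
    heapAt H s (k + 1) = (heapAt H s k).releaseAll ((Img.objs s.imgs[k]).map Prod.fst) := by
  unfold heapAt
  rw [List.take_succ_eq_append_getElem hk, List.flatMap_append, List.map_append, GifFreeExtensions.releaseAll_append]
  simp only [List.flatMap_cons, List.flatMap_nil, List.append_nil]

/-- **The `free`s of one round, in the order of the code**: the colour map (`GifFreeMapObject`), the raster (`free`), the
extension list (`GifFreeExtensions`). -/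
theorem heapAt_round (Hc : Heap) (g : Img) :
    Hc.releaseAll ((Img.objs g).map Prod.fst) =
      ((Hc.releaseAll ((Map.objs g.cm).map Prod.fst)).releaseAll ((rasterObjs g.raster).map Prod.fst)).releaseAll
        ((Exts.objs g.ext).map Prod.fst) := by
  unfold Img.objs
  rw [List.map_append, List.map_append, GifFreeExtensions.releaseAll_append, GifFreeExtensions.releaseAll_append]

/-- `GifFreeMapObject` frees the colours first: the same heap. -/
theorem releaseAll_map (Hc : Heap) (m : Map) :
    Hc.releaseAll ((Map.objs (some m)).map Prod.fst) = (Hc.release m.colors).release m.obj := by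
  unfold Map.objs
  simp only [List.map_cons, List.map_nil, Heap.releaseAll_cons, Heap.releaseAll_nil]
  exact GifFreeExtensions.release_comm Hc m.obj m.colors

/-- **One round**: the objects of image `k` are the first of what is live behind the array. -/
theorem liveAt_succ (F : Forest) (s : Saved) (k : Nat) (hk : k < s.imgs.length) :
    liveAt F s k =
      (s.arr, 56 * s.cap) :: ((Img.objs s.imgs[k] ++ (s.imgs.drop (k + 1)).flatMap Img.objs) ++ F.ownedButSaved) := by
  unfold liveAt
  rw [List.drop_eq_getElem_cons hk, List.flatMap_cons]

/-- After the last round the array and everything else of the forest are live. -/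
theorem liveAt_end (F : Forest) (s : Saved) : liveAt F s s.imgs.length = (s.arr, 56 * s.cap) :: F.ownedButSaved := by
  unfold liveAt
  rw [List.drop_length, List.flatMap_nil, List.nil_append]

/-- **After the last round and the `free` of the array: the contract's final heap** (the array first there, last here). -/
theorem heapAt_end (H : Heap) (s : Saved) :
    (heapAt H s s.imgs.length).release s.arr = H.releaseAll ((Saved.objs (some s)).map Prod.fst) := by
  unfold heapAt
  rw [List.take_length, GifFreeExtensions.releaseAll_release]
  rfl

/-- The objects of a done image are among the image's. -/
theorem doneImg_objs_sublist (g : Img) : (Img.objs (doneImg g)).Sublist (Img.objs g) := by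
  unfold Img.objs doneImg
  simp only [Map.objs, Exts.objs, List.nil_append, List.append_nil]
  have h1 : (rasterObjs g.raster).Sublist (Map.objs g.cm ++ rasterObjs g.raster) := List.sublist_append_right _ _
  exact h1.trans (List.sublist_append_left _ _)

/-- **The objects of the forest after `k` rounds are among the entry's** (live or freed). -/
theorem forestAt_owned_sublist (F : Forest) (s : Saved) (k : Nat) (hs : F.saved = some s) :
    (forestAt F s k).owned.Sublist F.owned := by
  have h1 : ((s.imgs.take k).map doneImg).flatMap Img.objs = (s.imgs.take k).flatMap (fun g => Img.objs (doneImg g)) :=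
    List.flatMap_map doneImg Img.objs (s.imgs.take k)
  have h2 : ((s.imgs.take k).flatMap (fun g => Img.objs (doneImg g))).Sublist ((s.imgs.take k).flatMap Img.objs) :=
    carry_flatMap_sub _ _ doneImg_objs_sublist _
  have h3 : ((imgsAt s k).flatMap Img.objs).Sublist (s.imgs.flatMap Img.objs) := by
    have e : s.imgs.flatMap Img.objs = (s.imgs.take k).flatMap Img.objs ++ (s.imgs.drop k).flatMap Img.objs := by
      rw [← List.flatMap_append, List.take_append_drop]
    unfold imgsAt
    rw [List.flatMap_append, h1, e]
    exact List.Sublist.append h2 (List.Sublist.refl _)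
  have h4 : (Saved.objs (forestAt F s k).saved).Sublist (Saved.objs F.saved) := by
    rw [forestAt_saved, hs]
    unfold Saved.objs
    exact List.Sublist.cons_cons _ h3
  unfold Forest.owned
  rw [forestAt_gif, forestAt_pv, forestAt_scm, forestAt_icm, forestAt_pend]
  apply List.Sublist.cons_cons
  apply List.Sublist.cons_cons
  apply List.Sublist.append _ (List.Sublist.refl _)
  exact List.Sublist.append (List.Sublist.refl _) h4

/-- **Where the objects of the forest after `k` rounds are** (what `Shape.set_saved` and `Shape.through_free` ask), from where
the entry's are. -/
theorem placedAt {Hc : Heap} {F : Forest} {s : Saved} (h : Placed Hc F.owned) (hs : F.saved = some s) (k : Nat) :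
    Placed Hc (forestAt F s k).owned :=
  h.sublist (forestAt_owned_sublist F s k hs)

/-! ### The array's shape, one round later -/

/-- A done image has no structural part. -/
theorem doneImg_structs (g : Img) : Img.structs (doneImg g) = [] := rfl

/-- **THE ARRAY'S SHAPE ONE ROUND LATER** (the obligation `hsv` of `Shape.set_saved` in segment 2): every OTHER slot's 56 bytes and
the structural parts of every other image (its `ColorMapObject`, the counted part of its extension array) are as they were — the
round wrote into slot `k`, into chunk headers and shadow bytes only —, and slot `k` now agrees with `doneImg s.imgs[k]`. -/
theorem savedAt_round {s : Saved} {k p c : Nat} {mem mem' : Mem} (hk : k < s.imgs.length)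
    (h : SavedAt (some { s with imgs := imgsAt s k }) p c mem)
    (hslot : ∀ j, j < s.imgs.length → j ≠ k → Mem.EqOn (s.arr + 56 * j) (s.arr + 56 * j + 56) mem mem')
    (hstruct : ∀ j (hj : j < s.imgs.length), j ≠ k → ∀ o, o ∈ Img.structs s.imgs[j] → Mem.EqOn o.1 (o.1 + o.2) mem mem')
    (hlt : ∀ o, o ∈ Saved.structs (some s) → o.1 + o.2 < 2 ^ 64)
    (hg : ImgAt (s.arr + 56 * k) (doneImg s.imgs[k]) mem') :
    SavedAt (some { s with imgs := imgsAt s (k + 1) }) p c mem' := by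
  obtain ⟨k1, k2, k3, k4, k5⟩ := h
  have hin0 := hlt (s.arr, 56 * s.imgs.length) (by simp only [Saved.structs, List.mem_cons, true_or])
  simp only at hin0
  have hsub : ∀ j (hj : j < s.imgs.length), ∀ o, o ∈ Img.structs s.imgs[j] → o ∈ Saved.structs (some s) := by
    intro j hj o ho
    simp only [Saved.structs, List.mem_cons, List.mem_flatMap]
    exact Or.inr ⟨s.imgs[j], List.getElem_mem hj, ho⟩
  refine ⟨k1, ?_, ?_, k4, ?_⟩
  · show c = (imgsAt s (k + 1)).length
    rw [imgsAt_length]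
    have e : c = (imgsAt s k).length := k2
    rw [imgsAt_length] at e
    exact e
  · show (imgsAt s (k + 1)).length ≤ s.cap
    rw [imgsAt_length]
    have e : (imgsAt s k).length ≤ s.cap := k3
    rw [imgsAt_length] at e
    exact e
  · intro j hj
    have hj1 : j < (imgsAt s (k + 1)).length := hj
    have hj' : j < s.imgs.length := by
      rw [imgsAt_length] at hj1
      exact hj1
    have hj0 : j < (imgsAt s k).length := by
      rw [imgsAt_length]
      exact hj'
    have hold : ImgAt (s.arr + 56 * j) (imgsAt s k)[j] mem := k5 j hj0
    show ImgAt (s.arr + 56 * j) (imgsAt s (k + 1))[j] mem'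
    by_cases hjk : j < k
    · rw [imgsAt_lt s (k + 1) j hj' (by omega) hj1]
      rw [imgsAt_lt s k j hj' hjk hj0] at hold
      apply hold.frame (hslot j hj' (by omega))
      · intro o ho
        rw [doneImg_structs] at ho
        exact absurd ho List.not_mem_nil
      · omega
      · intro x hx
        exact absurd hx (by simp only [doneImg, reduceCtorEq, not_false_eq_true])
      · intro x hx
        exact absurd hx (by simp only [doneImg, reduceCtorEq, not_false_eq_true])
    · by_cases hjk' : j = k
      · subst hjk'
        rw [imgsAt_lt s (j + 1) j hj' (by omega) hj1]
        exact hg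
      · rw [imgsAt_ge s (k + 1) j hj' (by omega) hj1]
        rw [imgsAt_ge s k j hj' (by omega) hj0] at hold
        apply hold.frame (hslot j hj' hjk')
        · intro o ho
          exact hstruct j hj' hjk' o ho
        · omega
        · intro x hx
          have hmem : (x.obj, 24) ∈ Img.structs s.imgs[j] := by
            unfold Img.structs
            rw [hx]
            simp only [Map.structs, List.mem_append, List.mem_singleton, true_or]
          exact hlt (x.obj, 24) (hsub j hj' _ hmem)
        · intro x hx
          have hmem : (x.arr, 24 * x.blocks.length) ∈ Img.structs s.imgs[j] := by
            unfold Img.structs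
            rw [hx]
            simp only [Exts.structs, List.mem_append, List.mem_singleton, or_true]
          exact hlt (x.arr, 24 * x.blocks.length) (hsub j hj' _ hmem)

/-! ### The postcondition's shape, from the loop's -/

/-- **`CloseShape F` in a memory that differs from one with the shape of `Fx`** — a forest with the components of `F` but for
`saved` — **in windows that miss everything but the `saved` component** (`carry_Off … True True False True True`: from
`carry_Off.of_loose` for a loose window, `carry_Off.in_gif G 72 80` for the store of `gif.SavedImages`), if the field holds NULL.
(`Shape.carry_set` cannot be used: `gif.ImageCount` keeps the old count, so no `SavedAt` holds; hence `CloseShape`.) -/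
theorem closeShape_of_carry {Hc : Heap} {Fx F : Forest} {R : Rd} {mem mem' : Mem} {ws : List Span} (h : Shape Fx R mem)
    (G : carry_Geo Hc Fx R) (hs : Mem.SameExcept ws mem mem')
    (hoff : ∀ w, w ∈ ws → carry_Off Fx R True True False True True w)
    (egif : Fx.gif = F.gif) (epv : Fx.pv = F.pv) (escm : Fx.scm = F.scm) (eicm : Fx.icm = F.icm) (epend : Fx.pend = F.pend)
    (h0 : GifFileType.SavedImages mem' F.gif = 0) : CloseShape F R mem' := by
  obtain ⟨xg, hxg, eg, cg⟩ := G.gifObj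
  obtain ⟨xp, hxp, ep, cp⟩ := G.pvObj
  have bg := G.inData xg hxg
  have bp := G.inData xp hxp
  have bc := G.cur
  have hlt : ∀ o, o ∈ Fx.structs → o.1 + o.2 < 2 ^ 64 := by
    intro o ho
    obtain ⟨y, hy, e, hcap⟩ := G.structObj o ho
    have := G.inData y hy
    omega
  have hE : ∀ lo hi, (∀ w, w ∈ ws → hi ≤ w.lo ∨ w.hi ≤ lo) → Mem.EqOn lo hi mem mem' := by
    intro lo hi hd
    exact hs.eqOn lo hi hd
  have hgif3 : Mem.EqOn (Fx.gif + 104) (Fx.gif + 120) mem mem' := by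
    apply hE
    intro w hw
    have := (hoff w hw).gif3
    omega
  have hpv1 : Mem.EqOn Fx.pv (Fx.pv + 4) mem mem' := by
    apply hE
    intro w hw
    have := (hoff w hw).pv1
    omega
  have hpv2 : Mem.EqOn (Fx.pv + 64) (Fx.pv + 80) mem mem' := by
    apply hE
    intro w hw
    have := (hoff w hw).pv2
    omega
  refine ⟨?_, ?_, ?_, h0, ?_, ?_, ?_, ?_⟩
  · show GifFileType.Private mem' F.gif = F.pv
    rw [← egif, ← epv]
    have := h.priv
    simp only [gfield] at this ⊢
    rw [hgif3.rd (Fx.gif + 112) 8 (by omega) (by omega) (by omega)]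
    exact this
  · show MapAt F.scm (GifFileType.SColorMap mem' F.gif) mem'
    rw [← egif, ← escm]
    have he : Mem.EqOn (Fx.gif + 24) (Fx.gif + 32) mem mem' := by
      apply hE
      intro w hw
      have := (hoff w hw).scmF trivial
      omega
    have f1 : GifFileType.SColorMap mem' Fx.gif = GifFileType.SColorMap mem Fx.gif := by
      simp only [gfield]
      exact he.rd (Fx.gif + 24) 8 (by omega) (by omega) (by omega)
    rw [f1]
    apply h.scm.frame
    · intro o ho
      apply hE
      intro w hw
      have := (hoff w hw).scmS trivial o ho
      omega
    · intro x hx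
      exact hlt (x.obj, 24) (carry_mem_structs_scm (by
        rw [hx]
        simp only [Map.structs, List.mem_singleton]))
  · show MapAt F.icm (GifFileType.Image.ColorMap mem' F.gif) mem'
    rw [← egif, ← eicm]
    have he : Mem.EqOn (Fx.gif + 64) (Fx.gif + 72) mem mem' := by
      apply hE
      intro w hw
      have := (hoff w hw).icmF trivial
      omega
    have f1 : GifFileType.Image.ColorMap mem' Fx.gif = GifFileType.Image.ColorMap mem Fx.gif := by
      simp only [gfield]
      exact he.rd (Fx.gif + 64) 8 (by omega) (by omega) (by omega)
    rw [f1]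
    apply h.icm.frame
    · intro o ho
      apply hE
      intro w hw
      have := (hoff w hw).icmS trivial o ho
      omega
    · intro x hx
      exact hlt (x.obj, 24) (carry_mem_structs_icm (by
        rw [hx]
        simp only [Map.structs, List.mem_singleton]))
  · show ExtsAt F.pend (GifFileType.ExtensionBlocks mem' F.gif) (GifFileType.ExtensionBlockCount mem' F.gif) mem'
    rw [← egif, ← epend]
    have he1 : Mem.EqOn (Fx.gif + 88) (Fx.gif + 96) mem mem' := by
      apply hE
      intro w hw
      have := (hoff w hw).pendF trivial
      omega
    have he2 : Mem.EqOn (Fx.gif + 80) (Fx.gif + 84) mem mem' := by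
      apply hE
      intro w hw
      have := (hoff w hw).pcF trivial
      omega
    have f1 : GifFileType.ExtensionBlocks mem' Fx.gif = GifFileType.ExtensionBlocks mem Fx.gif := by
      simp only [gfield]
      exact he1.rd (Fx.gif + 88) 8 (by omega) (by omega) (by omega)
    have f2 : GifFileType.ExtensionBlockCount mem' Fx.gif = GifFileType.ExtensionBlockCount mem Fx.gif := by
      simp only [gfield]
      exact he2.rd (Fx.gif + 80) 4 (by omega) (by omega) (by omega)
    rw [f1, f2]
    apply h.pend.frame
    · intro o ho
      apply hE
      intro w hw
      have := (hoff w hw).pendS trivial o ho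
      omega
    · intro x hx
      exact hlt (x.arr, 24 * x.blocks.length) (carry_mem_structs_pend (by
        rw [hx]
        simp only [Exts.structs, List.mem_singleton]))
  · show GifFilePrivateType.File mem' F.pv = 0
    rw [← epv]
    have := h.file
    simp only [gfield] at this ⊢
    rw [hpv2.rd (Fx.pv + 64) 8 (by omega) (by omega) (by omega)]
    exact this
  · show GifFilePrivateType.FileState mem' F.pv = 8
    rw [← epv]
    have := h.state
    simp only [gfield] at this ⊢
    rw [hpv1.rd Fx.pv 4 (by omega) (by omega) (by omega)]
    exact this
  · have he : Mem.EqOn R.cur (R.cur + 16) mem mem' := by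
      apply hE
      intro w hw
      have := (hoff w hw).cursor trivial
      omega
    have c1 : mem_cursor.cur mem' R.cur = mem_cursor.cur mem R.cur := by
      simp only [gfield]
      exact he.rd R.cur 8 (by omega) (by omega) (by omega)
    have c2 : mem_cursor.end mem' R.cur = mem_cursor.end mem R.cur := by
      simp only [gfield]
      exact he.rd (R.cur + 8) 8 (by omega) (by omega) (by omega)
    obtain ⟨k1, k2, k3⟩ := h.cursor
    refine ⟨?_, ?_, ?_⟩
    · rw [c1]
      exact k1
    · rw [c1, c2]
      exact k2
    · rw [c2]
      exact k3

/-! ### The assertions -/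

/-- **INSIDE THE LOOP** of `GifFreeSavedImages` at the address `cut` after `k` rounds, inside the call entered at `e` (return
address `ret`) with the function's precondition, for the array `s` (`F.saved = some s`): what the loop head and the loop's exit
share. Three registers are saved, `rsp = RA − 24`; `rbp = gif`; `r13`, `r14`, `r15` never touched. The heap is `heapAt H s k`;
`liveAt F s k` is live in it; every object of `F` is where it was (`placed`); the memory has the shape of `forestAt F s k`; no
input was read; nothing was written but the function's stack and the contract's windows. -/
structure Loop (cut : Word) (H : Heap) (rest : List Obj) (frames : List (Nat × FrameLayout)) (F : Forest) (R : Rd) (s : Saved)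
    (k : Nat) (u₀ e : State) (ret : Word) (v : State) : Prop where
  /-- the function was entered at `e` … -/
  entry : AtEntry (conv u₀) Gif.L.GifFreeSavedImages.entry (GifFreeSavedImages.spec H rest frames F R).frame ret e
  /-- … with its precondition -/
  pre : (GifFreeSavedImages.spec H rest frames F R).pre e
  /-- the array of the forest -/
  saved : F.saved = some s
  /-- the rounds done -/
  le : k ≤ s.imgs.length
  rip : v.rip = cut
  /-- three pushes -/
  rsp : v.reg .rsp = e.reg .rsp - 24
  /-- `mov rbp, rdi`: gif -/
  rbp : v.reg .rbp = e.reg .rdi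
  /-- `r13`, `r14`, `r15` are not used by the function -/
  r13 : v.reg .r13 = e.reg .r13
  r14 : v.reg .r14 = e.reg .r14
  r15 : v.reg .r15 = e.reg .r15
  /-- the saved registers, in push order -/
  slot_r12 : v.mem.readLE (e.reg .rsp - 8) 8 = (e.reg .r12).toNat
  slot_rbp : v.mem.readLE (e.reg .rsp - 16) 8 = (e.reg .rbp).toNat
  slot_rbx : v.mem.readLE (e.reg .rsp - 24) 8 = (e.reg .rbx).toNat
  /-- the return address is still in its slot (`ret` at 107FA4H pops it): every store so far went below `RA` (the pushes, the
  callees' frames) or into the heap's region and the shadow (the slots' fields, the `free`s) -/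
  slot_ra : UInt64.ofNat (v.mem.readLE (e.reg .rsp) 8) = ret
  /-- the heap's invariant for the heap after `k` rounds, the clean stack ending at the present stack pointer -/
  inv : HeapInv (heapAt H s k) rest frames ((e.reg .rsp).toNat - 24) v.mem
  /-- what is still live, no base twice -/
  owns : Owns (heapAt H s k) (liveAt F s k)
  /-- every object of the entry's forest, live or freed, is where it was -/
  placed : Placed (heapAt H s k) F.owned
  /-- the shape: the first `k` slots are done, everything else is as the forest says -/
  shape : Shape (forestAt F s k) R v.mem
  /-- no input was read -/
  rem : rem R v.mem = rem R e.mem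
  /-- nothing was written but the function's stack and the contract's window (the heap's region and the shadow: ONE coarse window) -/
  same : Mem.SameExcept
    [⟨(e.reg .rsp).toNat - 112, (e.reg .rsp).toNat⟩,
     ⟨0x800000, 0x1000020⟩] e.mem v.mem
  code : (conv u₀).code.In v.mem
  abi : (conv u₀).inv v

/-- **AT THE LOOP HEAD** (107F18H, l.438) after `k` rounds: `Loop`, and `rbx = sp = s.arr + 56 · k`, the slot of the next round
(`r12` is dead: re-loaded from `gif.SavedImages`). -/
structure Head (H : Heap) (rest : List Obj) (frames : List (Nat × FrameLayout)) (F : Forest) (R : Rd) (s : Saved) (k : Nat)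
    (u₀ e : State) (ret : Word) (v : State) : Prop where
  loop : Loop Gif.L.GifFreeSavedImages.at_107f18 H rest frames F R s k u₀ e ret v
  /-- `rbx = sp` -/
  rbx : (v.reg .rbx).toNat = s.arr + 56 * k

/-- **AT THE LOOP'S EXIT** (107F87H, l.451): `Loop` with every slot done (`k = length`), and `r12 = gif.SavedImages = s.arr`, the
array to free (`rbx` is dead). -/
structure AtExit (H : Heap) (rest : List Obj) (frames : List (Nat × FrameLayout)) (F : Forest) (R : Rd) (s : Saved)
    (u₀ e : State) (ret : Word) (v : State) : Prop where
  loop : Loop Gif.L.GifFreeSavedImages.at_107f87 H rest frames F R s s.imgs.length u₀ e ret v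
  /-- `r12 = gif.SavedImages` -/
  r12 : (v.reg .r12).toNat = s.arr

/-- **Segment 1** (107EE0H … 107F07H; 12 instructions, the dead `jmp` to the epilogue included; l.431-438): `gif != NULL` (a live
object), three pushes, the checked load of `gif.SavedImages` (`s.arr`, the base of a live object: not NULL), to the loop head
with `k = 0` (`forestAt_zero`, `heapAt_zero`, `liveAt_zero`, `Owns.placed`). The two early returns (`je 107FA5H`, `jmp 107FA0H`)
are dead by the precondition. -/
def Seg1 (Lay : Layout) (μ : Microarch) (u₀ : State) : Prop :=
  ∀ (H : Heap) (rest : List Obj) (frames : List (Nat × FrameLayout)) (F : Forest) (R : Rd) (e : State) (ret : Word),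
    AtEntry (conv u₀) Gif.L.GifFreeSavedImages.entry (GifFreeSavedImages.spec H rest frames F R).frame ret e →
    (GifFreeSavedImages.spec H rest frames F R).pre e →
    ReachVia Lay μ WayInv e (fun w => ∃ s, Head H rest frames F R s 0 u₀ e ret w)

/-- **Segment 2** (107F07H … 107F87H, entered at the head 107F18H; 31 instructions; l.438-449): the checked loads of
`gif.SavedImages` and `gif.ImageCount` (`s.arr`, `length`: `Shape.saved` of `forestAt`); `sp` at the end (`k = length`): `AtExit`.
Otherwise slot `k` is `s.imgs[k]` (`imgsAt_ge`): its colour map, if any: `GifFreeMapObject` (`releaseAll_map`) and the checked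
store of NULL; its raster, if any: `free`; `GifFreeExtensions` on its pair of cells (`ExtCells` with the array as the holder),
which leaves `(0, 0)`: the slot is `doneImg s.imgs[k]`; `sp++`: the head, one round later (`heapAt_succ` with `heapAt_round`,
`liveAt_succ`, `Placed.release`, `Shape.through_free`, `Shape.set_saved` with `placedAt` and `savedAt_round`; the gap windows of
`GifFreeExtensions`'s post are stated for the heap at ITS entry: `GifFreeExtensions.gap0_releaseAll`). -/
def Seg2 (Lay : Layout) (μ : Microarch) (u₀ : State) : Prop :=
  ∀ (H : Heap) (rest : List Obj) (frames : List (Nat × FrameLayout)) (F : Forest) (R : Rd) (s : Saved) (k : Nat) (e : State)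
    (ret : Word) (v : State),
    Head H rest frames F R s k u₀ e ret v →
    ReachVia Lay μ WayInv v (fun w =>
      Head H rest frames F R s (k + 1) u₀ e ret w ∨
      AtExit H rest frames F R s u₀ e ret w)

/-- **Segment 3** (107F87H … 107FA5H; 9 instructions; l.451-453): `free(gif.SavedImages)` (the array: `liveAt_end`; the final heap:
`heapAt_end`), the checked store `gif.SavedImages = NULL` (gif is live: `liveAt_end`), three pops, `ret`: the contract's
`Returned` (`CloseShape`: `closeShape_of_carry`; `HeapPre.raise_back`). -/
def Seg3 (Lay : Layout) (μ : Microarch) (u₀ : State) : Prop :=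
  ∀ (H : Heap) (rest : List Obj) (frames : List (Nat × FrameLayout)) (F : Forest) (R : Rd) (s : Saved) (e : State) (ret : Word)
    (v : State),
    AtExit H rest frames F R s u₀ e ret v →
    ReachVia Lay μ WayInv v (Returned (conv u₀) (GifFreeSavedImages.spec H rest frames F R) e ret)

/-- From the loop head to the return, by induction on the number of slots left (`d` bounds `length − k`). -/
theorem from_head {Lay : Layout} {μ : Microarch} {u₀ : State} (h2 : Seg2 Lay μ u₀) (h3 : Seg3 Lay μ u₀) (H : Heap)
    (rest : List Obj) (frames : List (Nat × FrameLayout)) (F : Forest) (R : Rd) (s : Saved) (e : State) (ret : Word) :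
    ∀ (d k : Nat), s.imgs.length - k ≤ d → ∀ v, Head H rest frames F R s k u₀ e ret v →
      ReachVia Lay μ WayInv v (Returned (conv u₀) (GifFreeSavedImages.spec H rest frames F R) e ret) := by
  intro d
  induction d with
  | zero =>
    intro k hk v hv
    refine (h2 H rest frames F R s k e ret v hv).trans ?_
    intro w hw
    rcases hw with hw | hw
    · have hle := hw.loop.le
      omega
    · exact h3 H rest frames F R s e ret w hw
  | succ d ih =>
    intro k hk v hv
    refine (h2 H rest frames F R s k e ret v hv).trans ?_
    intro w hw
    rcases hw with hw | hw
    · exact ih (k + 1) (by omega) w hw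
    · exact h3 H rest frames F R s e ret w hw

/-- **The composition of `GifFreeSavedImages`**: the prologue, the loop by induction on the number of slots left, the exit. -/
theorem compose {Lay : Layout} {μ : Microarch} {u₀ : State} (h1 : Seg1 Lay μ u₀) (h2 : Seg2 Lay μ u₀) (h3 : Seg3 Lay μ u₀) :
    ∀ (H : Heap) (rest : List Obj) (frames : List (Nat × FrameLayout)) (F : Forest) (R : Rd),
      Calls Lay μ WayInv (conv u₀) Gif.L.GifFreeSavedImages.entry (GifFreeSavedImages.spec H rest frames F R) := by
  intro H rest frames F R e ret he hp
  refine (h1 H rest frames F R e ret he hp).trans ?_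
  intro v hv
  obtain ⟨s, hv⟩ := hv
  exact from_head h2 h3 H rest frames F R s e ret (s.imgs.length - 0) 0 (Nat.le_refl _) v hv

end GifFreeSavedImages

end Gif.Spec
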